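-- pv_equiv track=rewrite | github.com/dionysos1/ISCRIP | week5/vierkantVanPascal.py | paden
-- ===== SOURCE A (Python) =====
-- def vierkant (rijgrootte, getal=1) -> [[]]:
--     # maak lijstjes aan om het viekant in op te slaan
--     alles = []
--     lijst = []
--
--     # vul de eerste rij met het getal
--     for y in range(rijgrootte):
--         lijst.append(getal)
--
--     # vul rij 2 met telkens het getal van links en boven in het grid
--     # en voeg daarna de lijst toe aan de grote lijst met alle lijsten.
--     for z in range(rijgrootte):
--         newlijst = [getal]
--
--         for x in range(rijgrootte-1):
--             newlijst.append(lijst[x+1] + newlijst[x])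
--         alles.append(lijst)
--         lijst = newlijst
--     return alles
--
-- def paden(rijgrootte, getal=1) -> str:
--     # haal de tekst op uit de vierkant functie
--     tekst = ''
--     vierkantje = vierkant(rijgrootte, getal)
--     # haal op hoe lang het laatste getal is
--     laatsteInLijst = vierkantje[rijgrootte - 1]
--     p = len(str(laatsteInLijst[rijgrootte - 1])) + 1
--     # loop door alle getallen heen en zet het allemaal op 1 grote regel,
--     # gescheiden door de lengte +1 van het laatste getal p
--     for x in vierkantje:
--         for y in x:
--             tekst += '{:{align}{width}}'.format(str(y), align='>', width=p)
--         tekst += '\n'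
--     return tekst
-- ===== SOURCE B (Python) =====
-- import math
--
-- def paden(rijgrootte, getal=1) -> str:
--     # closed form: cell (i, j) of the Pascal square is getal * C(i+j, i)
--     grid = [[getal * math.comb(i + j, i) for j in range(rijgrootte)]
--             for i in range(rijgrootte)]
--     p = len(str(grid[rijgrootte - 1][rijgrootte - 1])) + 1
--     return ''.join(
--         ''.join('{:{align}{width}}'.format(str(y), align='>', width=p) for y in row) + '\n'
--         for row in grid)
-- ===== Notes on version B (the rewrite author's own statement) =====
-- stated objective: simpler
-- what changed: Replaces the incremental left+above row-accumulation DP (a running row list rebuilt element by element) with a closed-form grid comprehension getal*math.comb(i+j,i), and builds the output string by joining comprehensions instead of string concatenation in nested loops.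
import Mathlib
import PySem

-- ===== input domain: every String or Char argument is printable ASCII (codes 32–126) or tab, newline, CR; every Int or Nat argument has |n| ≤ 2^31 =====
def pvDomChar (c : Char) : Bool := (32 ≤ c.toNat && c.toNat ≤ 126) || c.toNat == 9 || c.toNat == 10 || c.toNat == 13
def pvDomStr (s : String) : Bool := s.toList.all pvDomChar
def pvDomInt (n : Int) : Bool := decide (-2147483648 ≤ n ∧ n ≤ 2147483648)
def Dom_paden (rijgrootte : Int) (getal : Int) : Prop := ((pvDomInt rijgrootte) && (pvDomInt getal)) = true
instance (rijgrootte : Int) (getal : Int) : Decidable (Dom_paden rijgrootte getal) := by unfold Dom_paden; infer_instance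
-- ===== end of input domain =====

-- B changes how cell values are produced (closed-form getal * C(i+j, i) instead of A's
-- left+above row DP) and joins formatted rows instead of accumulating one big string; same output.

-- ===== PORT A =====
-- '{:{align}{width}}'.format(str(y), align='>', width=p): right-justify str(y) to width p with spaces
def padFmt (y : Int) (p : Nat) : List Char :=
  let s := PySem.Int.toChars y
  List.replicate (p - s.length) ' ' ++ s

-- port of vierkant: first row [getal]*n, then each new row newlijst[x+1] = lijst[x+1] + newlijst[x]
-- (the two pyGet? lookups are always in range when executed; .getD 0 is never taken — see rowA lemmas)
def vierkantA (rijgrootte : Int) (getal : Int) : List (List Int) :=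
  let lijst := (PySem.List.pyRange 0 rijgrootte 1).foldl (fun l _ => l ++ [getal]) ([] : List Int)
  let st := (PySem.List.pyRange 0 rijgrootte 1).foldl
    (fun (st : List (List Int) × List Int) _ =>
      let newlijst := (PySem.List.pyRange 0 (rijgrootte - 1) 1).foldl
        (fun nl x =>
          nl ++ [(PySem.List.pyGet? st.2 (x + 1)).getD 0 + (PySem.List.pyGet? nl x).getD 0])
        [getal]
      (st.1 ++ [st.2], newlijst))
    (([] : List (List Int)), lijst)
  st.1

def paden (rijgrootte : Int) (getal : Int) : String :=
  let vierkantje := vierkantA rijgrootte getal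
  match PySem.List.pyGet? vierkantje (rijgrootte - 1) with
  | none => ""  -- IndexError, excluded by Pre_paden
  | some laatsteInLijst =>
    match PySem.List.pyGet? laatsteInLijst (rijgrootte - 1) with
    | none => ""  -- IndexError, excluded by Pre_paden
    | some last =>
      let p := (PySem.Int.toChars last).length + 1
      String.ofList ((vierkantje.foldl
        (fun tekst x => x.foldl (fun t y => t ++ padFmt y p) tekst ++ ['\n']) []))

-- ===== PORT B =====
-- grid = [[getal * math.comb(i+j, i) for j in range(n)] for i in range(n)]
def gridB (rijgrootte : Int) (getal : Int) : List (List Int) :=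
  (PySem.List.pyRange 0 rijgrootte 1).map (fun i =>
    (PySem.List.pyRange 0 rijgrootte 1).map (fun j =>
      getal * (((i + j).toNat.choose i.toNat : Nat) : Int)))

def paden_alt (rijgrootte : Int) (getal : Int) : String :=
  let grid := gridB rijgrootte getal
  match PySem.List.pyGet? grid (rijgrootte - 1) with
  | none => ""  -- IndexError, excluded by Pre_paden
  | some row =>
    match PySem.List.pyGet? row (rijgrootte - 1) with
    | none => ""  -- IndexError, excluded by Pre_paden
    | some last =>
      let p := (PySem.Int.toChars last).length + 1
      String.ofList ((grid.map (fun row =>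
        (row.map (fun y => padFmt y p)).flatten ++ ['\n'])).flatten)

-- ===== PRECONDITION & SPEC =====
-- rijgrootte ≤ 0 makes A raise IndexError (vierkantje[rijgrootte-1] on the empty grid)
def Pre_paden (rijgrootte : Int) (_getal : Int) : Prop := 1 ≤ rijgrootte
instance (rijgrootte : Int) (getal : Int) : Decidable (Pre_paden rijgrootte getal) := by unfold Pre_paden; infer_instance
def pvWitness_paden : Int × Int := (3, 2)

def Spec_paden (rijgrootte : Int) (getal : Int) (out : String) : Prop := out = paden_alt rijgrootte getal
instance (rijgrootte : Int) (getal : Int) (out : String) : Decidable (Spec_paden rijgrootte getal out) := by unfold Spec_paden; infer_instance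

-- ===== CLAIM (what is proved, stated in full; the proofs are below) =====
def Claim_equal_paden : Prop := ∀ (rijgrootte : Int) (getal : Int), Dom_paden rijgrootte getal → Pre_paden rijgrootte getal → Spec_paden rijgrootte getal (paden rijgrootte getal)

-- ===== LEMMAS AND PROOFS =====

-- the closed-form row i of the Pascal square, over Nat indices
def rowC (getal : Int) (N i : Nat) : List Int :=
  (List.range N).map (fun j => getal * (((i + j).choose i : Nat) : Int))

theorem length_rowC (getal : Int) (N i : Nat) : (rowC getal N i).length = N := by
  simp [rowC]

theorem rowC_getElem (getal : Int) (N i j : Nat) (h : j < N) :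
    (rowC getal N i)[j]'(by simp [length_rowC]; omega) = getal * (((i + j).choose i : Nat) : Int) := by
  simp [rowC]

-- inner loop invariant and result: from rowC i it builds rowC (i+1)
theorem inner_take (getal : Int) (N i : Nat) (hN : 1 ≤ N) (m : Nat) (hm : m ≤ N - 1) :
    ((List.range m).map (fun (k : Nat) => (k : Int))).foldl
      (fun nl x =>
        nl ++ [(PySem.List.pyGet? (rowC getal N i) (x + 1)).getD 0 + (PySem.List.pyGet? nl x).getD 0])
      [getal]
    = (rowC getal N (i + 1)).take (m + 1) := by
  induction m with
  | zero =>
    simp [rowC, List.take_add_one]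
    cases N with
    | zero => omega
    | succ n => simp [List.range_succ_eq_map]
  | succ m ih =>
    rw [List.range_succ, List.map_append, List.foldl_append, ih (by omega)]
    simp only [List.map_cons, List.map_nil, List.foldl_cons, List.foldl_nil]
    have hm1 : m + 1 < N := by omega
    have hm2 : m + 2 ≤ N := by omega
    have hlen : ((rowC getal N (i + 1)).take (m + 1)).length = m + 1 := by
      simp [length_rowC]; omega
    -- pyGet? (rowC i) (↑m + 1)
    have h1 : (PySem.List.pyGet? (rowC getal N i) ((m : Int) + 1)).getD 0
        = getal * (((i + (m + 1)).choose i : Nat) : Int) := by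
      have : ((m : Int) + 1) = ((m + 1 : Nat) : Int) := by push_cast; ring
      rw [this, PySem.List.pyGet?_natCast]
      rw [List.getElem?_eq_getElem (by simp [length_rowC]; omega)]
      simp [rowC_getElem getal N i (m + 1) hm1]
    have h2 : (PySem.List.pyGet? ((rowC getal N (i + 1)).take (m + 1)) (m : Int)).getD 0
        = getal * (((i + 1 + m).choose (i + 1) : Nat) : Int) := by
      rw [PySem.List.pyGet?_natCast]
      rw [List.getElem?_eq_getElem (by omega)]
      rw [List.getElem_take]
      simp [rowC_getElem getal N (i + 1) m (by omega)]
    rw [h1, h2]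
    have hpascal : (i + (m + 1)).choose i + (i + 1 + m).choose (i + 1)
        = (i + 1 + (m + 1)).choose (i + 1) := by
      have h := Nat.succ_sub_one (i + 1 + m)
      have : (i + 1 + (m + 1)).choose (i + 1) = (i + 1 + m + 1).choose (i + 1) := by ring_nf
      rw [this, Nat.choose_succ_succ' (i + 1 + m) i]
      have : i + 1 + m - 1 = i + m := by omega
      congr 1
      · congr 1; omega
    have hval : getal * (((i + (m + 1)).choose i : Nat) : Int)
        + getal * (((i + 1 + m).choose (i + 1) : Nat) : Int)
        = getal * (((i + 1 + (m + 1)).choose (i + 1) : Nat) : Int) := by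
      rw [← hpascal]; push_cast; ring
    rw [hval]
    -- take (m+1) ++ [row[m+1]] = take (m+2)
    have htake : (rowC getal N (i + 1)).take (m + 1 + 1)
        = (rowC getal N (i + 1)).take (m + 1) ++ [getal * (((i + 1 + (m + 1)).choose (i + 1) : Nat) : Int)] := by
      rw [List.take_add_one]
      rw [List.getElem?_eq_getElem (by simp [length_rowC]; omega)]
      simp [rowC_getElem getal N (i + 1) (m + 1) hm1]
    rw [htake]

theorem inner_eq (getal : Int) (N i : Nat) (hN : 1 ≤ N) :
    ((List.range (N - 1)).map (fun (k : Nat) => (k : Int))).foldl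
      (fun nl x =>
        nl ++ [(PySem.List.pyGet? (rowC getal N i) (x + 1)).getD 0 + (PySem.List.pyGet? nl x).getD 0])
      [getal]
    = rowC getal N (i + 1) := by
  rw [inner_take getal N i hN (N - 1) le_rfl]
  have : N - 1 + 1 = N := by omega
  rw [this, List.take_of_length_le (by simp [length_rowC])]

-- outer loop invariant
theorem outer_inv (getal : Int) (N : Nat) (hN : 1 ≤ N) (k : Nat) (hk : k ≤ N) :
    ((List.range k).map (fun (j : Nat) => (j : Int))).foldl
      (fun (st : List (List Int) × List Int) _ =>
        (st.1 ++ [st.2],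
          ((List.range (N - 1)).map (fun (j : Nat) => (j : Int))).foldl
            (fun nl x =>
              nl ++ [(PySem.List.pyGet? st.2 (x + 1)).getD 0 + (PySem.List.pyGet? nl x).getD 0])
            [getal]))
      (([] : List (List Int)), rowC getal N 0)
    = ((List.range k).map (rowC getal N), rowC getal N k) := by
  induction k with
  | zero => simp
  | succ k ih =>
    rw [List.range_succ, List.map_append, List.foldl_append, ih (by omega)]
    simp only [List.map_cons, List.map_nil, List.foldl_cons, List.foldl_nil]
    rw [inner_eq getal N k hN]
    simp

theorem pyRange_cast (n : Int) :
    PySem.List.pyRange 0 n 1 = (List.range n.toNat).map (fun (k : Nat) => (k : Int)) := by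
  rw [PySem.List.pyRange_one]
  simp

theorem vierkantA_eq (rijgrootte : Int) (getal : Int) (h : 1 ≤ rijgrootte) :
    vierkantA rijgrootte getal = (List.range rijgrootte.toNat).map (rowC getal rijgrootte.toNat) := by
  have hN : 1 ≤ rijgrootte.toNat := by omega
  have hfirst : (PySem.List.pyRange 0 rijgrootte 1).foldl (fun l _ => l ++ [getal]) ([] : List Int)
      = rowC getal rijgrootte.toNat 0 := by
    rw [pyRange_cast, PySem.List.foldl_append_singleton_eq_map (f := fun _ => getal)]
    simp [rowC, Function.comp_def, List.map_const']
  have hr1 : PySem.List.pyRange 0 (rijgrootte - 1) 1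
      = (List.range (rijgrootte.toNat - 1)).map (fun (k : Nat) => (k : Int)) := by
    rw [pyRange_cast]
    congr 2
    omega
  simp only [vierkantA]
  rw [hfirst]
  simp only [hr1]
  rw [pyRange_cast, outer_inv getal rijgrootte.toNat hN rijgrootte.toNat le_rfl]

theorem gridB_eq (rijgrootte : Int) (getal : Int) (_h : 0 ≤ rijgrootte) :
    gridB rijgrootte getal = (List.range rijgrootte.toNat).map (rowC getal rijgrootte.toNat) := by
  unfold gridB
  rw [pyRange_cast, List.map_map]
  apply List.map_congr_left
  intro i hi
  simp only [Function.comp_def]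
  rw [List.map_map]
  unfold rowC
  apply List.map_congr_left
  intro j hj
  simp only [Function.comp_def]
  have e1 : ((i : Int) + (j : Int)).toNat = i + j := by omega
  have e2 : ((i : Int)).toNat = i := by omega
  rw [e1, e2]

-- the two render shapes produce the same character list
theorem render_eq (g : List (List Int)) (p : Nat) :
    g.foldl (fun tekst x => x.foldl (fun t y => t ++ padFmt y p) tekst ++ ['\n']) []
    = (g.map (fun row => (row.map (fun y => padFmt y p)).flatten ++ ['\n'])).flatten := by
  have hinner : ∀ (tekst : List Char) (x : List Int),
      x.foldl (fun t y => t ++ padFmt y p) tekst = tekst ++ (x.map (fun y => padFmt y p)).flatten := by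
    intro tekst x
    rw [PySem.List.foldl_append_eq_flatMap (g := fun y => padFmt y p)]
    rw [List.flatMap_def]
  have : g.foldl (fun tekst x => x.foldl (fun t y => t ++ padFmt y p) tekst ++ ['\n']) []
      = g.foldl (fun tekst x => tekst ++ ((x.map (fun y => padFmt y p)).flatten ++ ['\n'])) [] := by
    apply PySem.List.foldl_congr_mem
    intro acc x _
    rw [hinner, List.append_assoc]
  rw [this]
  have h2 := PySem.List.foldl_append_eq_flatMap
    (g := fun x : List Int => (List.map (fun y => padFmt y p) x).flatten ++ ['\n'])
    (l := g) (acc := ([] : List Char))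
  rw [List.flatMap_def] at h2
  simpa using h2

-- ===== VERDICT (by name: the statement is the Claim_ definition above) =====
theorem paden_spec : Claim_equal_paden := by
  intro rijgrootte getal _ hpre
  unfold Spec_paden
  have h0 : 1 ≤ rijgrootte := hpre
  have hge : vierkantA rijgrootte getal = gridB rijgrootte getal := by
    rw [vierkantA_eq rijgrootte getal h0, gridB_eq rijgrootte getal (by omega)]
  simp only [paden, paden_alt, hge]
  cases h1 : PySem.List.pyGet? (gridB rijgrootte getal) (rijgrootte - 1) with
  | none => simp
  | some row =>
    cases h2 : PySem.List.pyGet? row (rijgrootte - 1) with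
    | none => simp [h2]
    | some last =>
      simp only [h2]
      rw [render_eq]
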